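-- pv_equiv track=rewrite | github.com/andreis/aoc | 2025/03.py | solve_line
-- ===== SOURCE A (Python) =====
-- def solve_line(line, answer_size=2):
--     line = line[::-1]
--
--     answer = list(range(answer_size))
--     for index in range(len(answer) - 1, -1, -1):
--         hi = len(line) if index == answer_size - 1 else answer[index + 1]
--         idx = hi - 1
--         target = max(line[answer[index] : hi])
--         while line[idx] != target:
--             idx -= 1
--         answer[index] = idx
--
--     return int("".join(map(lambda x: str(line[x]), answer[::-1])))
-- ===== SOURCE B (Python) =====
-- def solve_line(line, answer_size=2):
--     # One forward pass with a monotonic stack: keep a stack of digits, popping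
--     # while a budget of len(line)-answer_size drops remains and the incoming
--     # digit beats the top; the first answer_size stack entries are the answer.
--     drop = len(line) - answer_size
--     stack = []
--     for d in line:
--         while drop > 0 and stack and stack[-1] < d:
--             stack.pop()
--             drop -= 1
--         stack.append(d)
--     return int("".join(str(d) for d in stack[:answer_size]))
-- ===== Notes on version B (the rewrite author's own statement) =====
-- stated objective: faster
-- what changed: Replaced A's reversed per-position max-scan (for each answer position: slice, max(), and a downward while-search for the max's index) with a single forward monotonic-stack pass that pops smaller digits while a drop budget of len(line)-answer_size remains and finally keeps the first answer_size stack entries.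
-- outside the precondition, e.g. on solve_line([9, -1, 3], 2): A returns 93, B returns 93; on solve_line([5, -3, -1], 2): A raises ValueError, B raises ValueError
import Mathlib
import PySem

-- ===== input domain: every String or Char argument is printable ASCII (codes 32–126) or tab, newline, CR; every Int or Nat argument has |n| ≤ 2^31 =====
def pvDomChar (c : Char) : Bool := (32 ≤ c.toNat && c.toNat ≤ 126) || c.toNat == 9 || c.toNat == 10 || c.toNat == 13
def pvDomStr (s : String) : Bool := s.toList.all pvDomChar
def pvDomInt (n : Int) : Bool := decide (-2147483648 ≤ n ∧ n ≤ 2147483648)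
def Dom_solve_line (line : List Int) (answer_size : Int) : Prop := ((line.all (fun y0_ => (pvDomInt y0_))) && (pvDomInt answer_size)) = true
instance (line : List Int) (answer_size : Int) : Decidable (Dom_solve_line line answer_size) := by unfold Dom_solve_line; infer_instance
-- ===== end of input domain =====

-- B replaces A's reversed per-position max-scan with a single forward monotonic-stack pass (alternative algorithm, one pass).

-- ===== PORT A =====
-- the 'while line[idx] != target: idx -= 1' loop; under Pre_ the target is always
-- found at some index ≥ 0 before idx could go negative, so the Nat countdown is exact there
def pvFindDown (line : List Int) (target : Int) : Nat → Int
  | 0 => 0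
  | i + 1 =>
    if PySem.List.pyGetD line ((i : Int) + 1) 0 = target then (i : Int) + 1
    else pvFindDown line target i

-- the body of A's for-loop (ans = answer; index runs down the range); pyGetD/pySetD are
-- exact here because under Pre_ every index touched is in range
def pvAStep (lrev : List Int) (answer_size : Int) (ans : List Int) (index : Int) : List Int :=
  let hi : Int := if index = answer_size - 1 then (lrev.length : Int) else PySem.List.pyGetD ans (index + 1) 0
  let idx : Int := hi - 1
  let target : Int := (PySem.List.max? (PySem.List.slice lrev (some (PySem.List.pyGetD ans index 0)) (some hi)) (fun y => y)).getD 0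
  -- idx.toNat is exact under Pre_ (hi ≥ 1 there)
  let idx := pvFindDown lrev target idx.toNat
  PySem.List.pySetD ans index idx

def solve_line (line : List Int) (answer_size : Int) : Int :=
  let line := (PySem.List.slice? line none none (-1)).getD []     -- line = line[::-1]
  let answer := PySem.List.pyRange 0 answer_size 1                -- list(range(answer_size))
  let answer := (PySem.List.pyRange ((answer.length : Int) - 1) (-1) (-1)).foldl
    (pvAStep line answer_size) answer
  (PySem.Int.ofStr? (PySem.Str.join ""
    (((PySem.List.slice? answer none none (-1)).getD []).map
      (fun x => PySem.Int.toStr (PySem.List.pyGetD line x 0))))).getD 0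

-- ===== PORT B =====
-- the inner 'while drop > 0 and stack and stack[-1] < d: stack.pop(); drop -= 1';
-- the stack is kept top-first (head = Python's stack[-1])
def pvPopLoop (stack : List Int) (drop : Int) (d : Int) : List Int × Int :=
  match stack with
  | [] => ([], drop)
  | t :: rest => if 0 < drop ∧ t < d then pvPopLoop rest (drop - 1) d else (t :: rest, drop)

-- one iteration of B's for-loop: pop phase, then stack.append(d)
def pvBStep (s : List Int × Int) (d : Int) : List Int × Int :=
  let p := pvPopLoop s.1 s.2 d
  (d :: p.1, p.2)

def solve_line_alt (line : List Int) (answer_size : Int) : Int :=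
  let st := line.foldl pvBStep ([], (line.length : Int) - answer_size)
  -- stack[:answer_size]: the stack is stored top-first, so read it bottom-first via reverse
  let picked := PySem.List.slice st.1.reverse none (some answer_size)
  (PySem.Int.ofStr? (PySem.Str.join "" (picked.map (fun d => PySem.Int.toStr d)))).getD 0

-- ===== PRECONDITION & SPEC =====
-- Pre_ excludes: answer_size outside 1..len(line) (A raises ValueError on max of an empty
-- slice / int('')), and, conservatively, lists whose last answer_size entries are not all
-- nonnegative (for answer_size ≥ 2, unless answer_size = len(line) with only the head negative),
-- because the final int(join) raises ValueError whenever a selected negative lands in a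
-- non-leading position; when the length-answer_size suffix is nonnegative every greedy window
-- contains a nonnegative entry, so no selected digit is negative and A returns. On some
-- excluded inputs the greedy happens to avoid the negatives and A still returns (B matches it there).
def Pre_solve_line (line : List Int) (answer_size : Int) : Prop :=
  1 ≤ answer_size ∧ answer_size ≤ line.length ∧
    (answer_size = 1 ∨ (∀ d ∈ line.drop (line.length - answer_size.toNat), 0 ≤ d) ∨
      (answer_size = line.length ∧ ∀ d ∈ line.drop 1, 0 ≤ d))
instance (line : List Int) (answer_size : Int) : Decidable (Pre_solve_line line answer_size) := by
  unfold Pre_solve_line; infer_instance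

def pvWitness_solve_line : List Int × Int := ([3, 1, 4, 1, 5], 2)

def Spec_solve_line (line : List Int) (answer_size : Int) (out : Int) : Prop := out = solve_line_alt line answer_size
instance (line : List Int) (answer_size : Int) (out : Int) : Decidable (Spec_solve_line line answer_size out) := by unfold Spec_solve_line; infer_instance

-- ===== CLAIM (what is proved, stated in full; the proofs are below) =====
def Claim_equal_solve_line : Prop := ∀ (line : List Int) (answer_size : Int), Dom_solve_line line answer_size → Pre_solve_line line answer_size → Spec_solve_line line answer_size (solve_line line answer_size)
-- ===== LEMMAS AND PROOFS =====

-- max(w) for a nonempty list, 0 for the empty one (what A's '(max? …).getD 0' computes)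
def pvMaxD (w : List Int) : Int := (PySem.List.max? w (fun y => y)).getD 0

-- the common greedy specification: pvG k xs = the k digits both programs select from xs,
-- leftmost first (max over the feasible window, earliest occurrence, then recurse)
def pvG : Nat → List Int → List Int
  | 0, _ => []
  | Nat.succ k, xs =>
    pvMaxD (xs.take (xs.length - k)) ::
      pvG k (xs.drop (xs.idxOf (pvMaxD (xs.take (xs.length - k))) + 1))

-- A's chain of chosen reversed-line indices, highest answer position first
def pvIdxChain (lrev : List Int) : Nat → Int → List Int
  | 0, _ => []
  | Nat.succ i, hi =>
    let target : Int := (PySem.List.max? (PySem.List.slice lrev (some (i : Int)) (some hi)) (fun y => y)).getD 0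
    let a := pvFindDown lrev target (hi - 1).toNat
    a :: pvIdxChain lrev i a


-- ---------- generic facts about pvMaxD ----------

theorem pvMaxD_mem (w : List Int) (hw : w ≠ []) : pvMaxD w ∈ w := by
  cases w with
  | nil => exact absurd rfl hw
  | cons h t =>
    have hmax := PySem.List.max?_id_cons (x := h) (t := t)
    have hm := PySem.List.max?_mem hmax
    simpa [pvMaxD, hmax] using hm

theorem pvMaxD_le (w : List Int) : ∀ y ∈ w, y ≤ pvMaxD w := by
  intro y hy
  cases w with
  | nil => simp at hy
  | cons h t =>
    have hmax := PySem.List.max?_id_cons (x := h) (t := t)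
    have := PySem.List.max?_isMax hmax y hy
    simpa [pvMaxD, hmax] using this

theorem pvMaxD_eq_of (w : List Int) (m : Int) (hm : m ∈ w) (hle : ∀ y ∈ w, y ≤ m) :
    pvMaxD w = m := by
  have hne : w ≠ [] := List.ne_nil_of_mem hm
  exact le_antisymm (hle _ (pvMaxD_mem w hne)) (pvMaxD_le w m hm)

theorem pvMaxD_reverse (w : List Int) : pvMaxD w.reverse = pvMaxD w := by
  rcases eq_or_ne w [] with h | h
  · subst h; rfl
  · exact pvMaxD_eq_of _ _ (by simpa using pvMaxD_mem w h)
      (fun y hy => pvMaxD_le w y (by simpa using hy))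

-- elements strictly before the first occurrence differ from it
theorem pv_before_idxOf_ne (xs : List Int) (v : Int) (r : Nat) (hr : r < xs.idxOf v)
    (h : r < xs.length) : xs[r] ≠ v := by
  induction xs generalizing r with
  | nil => simp at h
  | cons a t ih =>
    by_cases ha : a = v
    · subst ha; simp [List.idxOf_cons_self] at hr
    · cases r with
      | zero => simpa using ha
      | succ r =>
        rw [List.idxOf_cons_ne _ ha] at hr
        exact ih r (Nat.lt_of_succ_lt_succ hr) (by simpa using Nat.lt_of_succ_lt_succ h)

-- ---------- B side: the monotonic stack ----------

theorem pvPopLoop_suffix (S : List Int) (b d : Int) : (pvPopLoop S b d).1.IsSuffix S := by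
  induction S generalizing b with
  | nil => simp [pvPopLoop]
  | cons t rest ih =>
    by_cases hc : 0 < b ∧ t < d
    · simp only [pvPopLoop, if_pos hc]
      exact (ih (b - 1)).trans (List.suffix_cons t rest)
    · simp [pvPopLoop, if_neg hc]

theorem pvPopLoop_drop_len (S : List Int) (b d : Int) :
    (pvPopLoop S b d).2 - ((pvPopLoop S b d).1.length : Int) = b - (S.length : Int) := by
  induction S generalizing b with
  | nil => simp [pvPopLoop]
  | cons t rest ih =>
    by_cases hc : 0 < b ∧ t < d
    · simp only [pvPopLoop, if_pos hc]
      have := ih (b - 1)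
      simp only [List.length_cons] at this ⊢
      push_cast at this ⊢
      omega
    · simp [pvPopLoop, if_neg hc]

theorem pvPopLoop_append (S : List Int) (b d m : Int)
    (h : 0 < b - (S.length : Int) → d ≤ m) :
    pvPopLoop (S ++ [m]) b d = ((pvPopLoop S b d).1 ++ [m], (pvPopLoop S b d).2) := by
  induction S generalizing b with
  | nil =>
    have hnot : ¬ (0 < b ∧ m < d) := by
      rintro ⟨hb, hmd⟩
      have := h (by simpa using hb)
      omega
    simp [pvPopLoop, if_neg hnot]
  | cons t rest ih =>
    by_cases hc : 0 < b ∧ t < d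
    · simp only [List.cons_append, pvPopLoop, if_pos hc]
      exact ih (b - 1) (by
        intro hb
        apply h
        simp only [List.length_cons]
        push_cast at hb ⊢
        omega)
    · simp [pvPopLoop, if_neg hc]

theorem pvPopLoop_all_lt (S : List Int) (b m : Int) (h : ∀ a ∈ S, a < m)
    (hb : (S.length : Int) ≤ b) : pvPopLoop S b m = ([], b - (S.length : Int)) := by
  induction S generalizing b with
  | nil => simp [pvPopLoop]
  | cons t rest ih =>
    have hc : 0 < b ∧ t < m := by
      refine ⟨?_, h t (by simp)⟩
      simp only [List.length_cons] at hb
      push_cast at hb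
      omega
    simp only [pvPopLoop, if_pos hc]
    rw [ih (b - 1) (fun a ha => h a (List.mem_cons_of_mem _ ha)) (by
      simp only [List.length_cons] at hb
      push_cast at hb ⊢
      omega)]
    simp only [List.length_cons, Prod.mk.injEq]
    push_cast
    exact ⟨trivial, by ring⟩

theorem pv_run_append_bot (xs : List Int) : ∀ (S : List Int) (b m : Int),
    (∀ q (hq : q < xs.length), (q : Int) < b - (S.length : Int) → xs[q] ≤ m) →
    xs.foldl pvBStep (S ++ [m], b) =
      ((xs.foldl pvBStep (S, b)).1 ++ [m], (xs.foldl pvBStep (S, b)).2) := by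
  induction xs with
  | nil => intro S b m h; simp
  | cons x xs ih =>
    intro S b m h
    have h0 : 0 < b - (S.length : Int) → x ≤ m := fun hb => by
      simpa using h 0 (by simp) (by simpa using hb)
    have hstep : pvBStep (S ++ [m], b) x =
        ((x :: (pvPopLoop S b x).1) ++ [m], (pvPopLoop S b x).2) := by
      simp [pvBStep, pvPopLoop_append S b x m h0]
    have hstep2 : pvBStep (S, b) x = (x :: (pvPopLoop S b x).1, (pvPopLoop S b x).2) := rfl
    simp only [List.foldl_cons]
    rw [hstep, hstep2]
    apply ih
    intro q hq hlt
    have hdl := pvPopLoop_drop_len S b x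
    have := h (q + 1) (by simpa using Nat.succ_lt_succ hq) (by
      simp only [List.length_cons] at hlt ⊢
      push_cast at hlt hdl ⊢
      omega)
    simpa using this

theorem pv_run_clear (p : List Int) : ∀ (S : List Int) (b m : Int) (rest : List Int),
    (∀ a ∈ S, a < m) → (∀ a ∈ p, a < m) → (S.length : Int) + (p.length : Int) ≤ b →
    (p ++ m :: rest).foldl pvBStep (S, b) =
      rest.foldl pvBStep ([m], b - (S.length : Int) - (p.length : Int)) := by
  induction p with
  | nil =>
    intro S b m rest hS hp hb
    have hstep : pvBStep (S, b) m = ([m], b - (S.length : Int)) := by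
      simp [pvBStep, pvPopLoop_all_lt S b m hS (by simpa using hb)]
    simp only [List.nil_append, List.foldl_cons]
    rw [hstep]
    norm_num
  | cons x p ih =>
    intro S b m rest hS hp hb
    have hstep : pvBStep (S, b) x = (x :: (pvPopLoop S b x).1, (pvPopLoop S b x).2) := rfl
    simp only [List.cons_append, List.foldl_cons]
    rw [hstep]
    have hdl := pvPopLoop_drop_len S b x
    have hS' : ∀ a ∈ x :: (pvPopLoop S b x).1, a < m := by
      intro a ha
      rcases List.mem_cons.mp ha with h1 | h1
      · subst h1; exact hp a (by simp)
      · exact hS a ((pvPopLoop_suffix S b x).subset h1)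
    have hb' : ((x :: (pvPopLoop S b x).1).length : Int) + (p.length : Int) ≤
        (pvPopLoop S b x).2 := by
      simp only [List.length_cons] at hb ⊢
      push_cast at hb hdl ⊢
      omega
    rw [ih (x :: (pvPopLoop S b x).1) (pvPopLoop S b x).2 m rest hS'
      (fun a ha => hp a (List.mem_cons_of_mem _ ha)) hb']
    have harith : (pvPopLoop S b x).2 - (((x :: (pvPopLoop S b x).1).length : Nat) : Int)
        - (p.length : Int) = b - (S.length : Int) - (((x :: p).length : Nat) : Int) := by
      simp only [List.length_cons] at hdl ⊢
      push_cast at hdl ⊢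
      omega
    rw [harith]

-- the stack pass computes the greedy selection
theorem pv_main_B (k : Nat) : ∀ (xs : List Int), 0 < k → k ≤ xs.length →
    ((xs.foldl pvBStep ([], (xs.length : Int) - (k : Int))).1.reverse).take k = pvG k xs := by
  induction k with
  | zero => intro xs h0 _; exact absurd h0 (by omega)
  | succ k ih =>
    intro xs _ hk
    have hwlen : (xs.take (xs.length - k)).length = xs.length - k := by
      simp
    have hwne : xs.take (xs.length - k) ≠ [] := by
      intro hnil
      rw [hnil] at hwlen
      simp at hwlen
      omega
    have hmw : pvMaxD (xs.take (xs.length - k)) ∈ xs.take (xs.length - k) :=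
      pvMaxD_mem _ hwne
    have hmxs : pvMaxD (xs.take (xs.length - k)) ∈ xs := List.mem_of_mem_take hmw
    set m := pvMaxD (xs.take (xs.length - k)) with hm
    set j := xs.idxOf m with hj
    have hsplitwd : xs.take (xs.length - k) ++ xs.drop (xs.length - k) = xs :=
      List.take_append_drop _ _
    have hjw : j = (xs.take (xs.length - k)).idxOf m := by
      conv_lhs => rw [hj, ← hsplitwd]
      exact List.idxOf_append_of_mem hmw
    have hjlt : j < xs.length - k := by
      have hlt := List.idxOf_lt_length_of_mem hmw
      rw [hwlen] at hlt
      rw [hjw]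
      exact hlt
    have hjn : j < xs.length := by omega
    have hxj : xs[j]'hjn = m := List.getElem_idxOf (List.idxOf_lt_length_of_mem hmxs)
    have hwle : ∀ i (hi : i < xs.length - k) (hin : i < xs.length), xs[i] ≤ m := by
      intro i hi hin
      have hmem : xs[i] ∈ xs.take (xs.length - k) := by
        have hgt := List.getElem_take (xs := xs) (j := xs.length - k) (i := i)
          (h := by rw [hwlen]; exact hi)
        rw [← hgt]
        exact List.getElem_mem _
      exact pvMaxD_le _ _ hmem
    have hbefore : ∀ i (hi : i < j), xs[i]'(by omega) < m := by
      intro i hi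
      have hne := pv_before_idxOf_ne xs m i (hj ▸ hi) (by omega)
      have hle := hwle i (by omega) (by omega)
      omega
    have hsplit : xs = xs.take j ++ m :: xs.drop (j + 1) := by
      conv_lhs => rw [← List.take_append_drop j xs, ← List.getElem_cons_drop hjn, hxj]
    have htlen : (xs.take j).length = j := by simp; omega
    have hb1 : (((k + 1 : Nat)) : Int) = (k : Int) + 1 := by push_cast; ring
    rw [hb1]
    set b := (xs.length : Int) - ((k : Int) + 1) with hbdef
    have hclear := pv_run_clear (xs.take j) [] b m (xs.drop (j + 1)) (by simp) (by
        intro a ha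
        rcases List.mem_iff_getElem.mp ha with ⟨i, hilt, rfl⟩
        have hij : i < j := by simpa [htlen] using hilt
        rw [List.getElem_take]
        exact hbefore i hij) (by
        simp only [List.length_nil, Nat.cast_zero, htlen, zero_add]
        rw [hbdef]
        omega)
    simp only [List.length_nil, Nat.cast_zero, htlen, sub_zero] at hclear
    have hbot := pv_run_append_bot (xs.drop (j + 1)) [] (b - (j : Int)) m (by
        intro q hq hlt
        simp only [List.length_nil, Nat.cast_zero, sub_zero] at hlt
        have hqlen : j + 1 + q < xs.length := by
          simp only [List.length_drop] at hq
          omega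
        rw [List.getElem_drop]
        refine hwle _ ?_ hqlen
        rw [hbdef] at hlt
        omega)
    simp only [List.nil_append] at hbot
    have hrun : List.foldl pvBStep ([], b) xs
        = ((List.foldl pvBStep ([], b - (j : Int)) (xs.drop (j + 1))).1 ++ [m],
           (List.foldl pvBStep ([], b - (j : Int)) (xs.drop (j + 1))).2) := by
      conv_lhs => rw [hsplit]
      rw [hclear, hbot]
    rw [hrun]
    have hGs : pvG (k + 1) xs = m :: pvG k (xs.drop (j + 1)) := by
      rw [pvG, ← hm, ← hj]
    rw [hGs]
    simp only [List.reverse_append, List.reverse_cons, List.reverse_nil, List.nil_append,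
      List.singleton_append, List.take_succ_cons]
    congr 1
    rcases Nat.eq_zero_or_pos k with hk0 | hk0
    · subst hk0
      simp [pvG]
    · have hdlen : k ≤ (xs.drop (j + 1)).length := by
        simp only [List.length_drop]
        omega
      have harith2 : b - (j : Int) = ((xs.drop (j + 1)).length : Int) - (k : Int) := by
        rw [hbdef]
        simp only [List.length_drop]
        omega
      rw [harith2]
      exact ih (xs.drop (j + 1)) hk0 hdlen

-- ---------- A side: the reversed per-position scan ----------

theorem pvFindDown_spec (xs : List Int) (t : Int) : ∀ (start p : Nat),
    start < xs.length → p ≤ start → xs[p]? = some t →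
    (∀ r, p < r → r ≤ start → xs[r]? ≠ some t) →
    pvFindDown xs t start = (p : Int) := by
  intro start
  induction start with
  | zero =>
    intro p _ hp _ _
    have hp0 : p = 0 := Nat.le_zero.mp hp
    subst hp0
    rfl
  | succ s ihs =>
    intro p hs hp hpt hno
    have hcast : ((s : Int) + 1) = ((s + 1 : Nat) : Int) := by push_cast; ring
    have hget : PySem.List.pyGetD xs ((s : Int) + 1) 0 = xs[s + 1]'hs := by
      rw [hcast, PySem.List.pyGetD_natCast]
      exact List.getD_eq_getElem xs 0 hs
    by_cases hpe : p = s + 1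
    · subst hpe
      have hval : xs[s + 1]'hs = t := by
        rwa [List.getElem?_eq_getElem hs, Option.some.injEq] at hpt
      conv_lhs => rw [pvFindDown]
      rw [hget, if_pos hval]
      exact hcast
    · have hps : p ≤ s := by omega
      have hne : xs[s + 1]'hs ≠ t := by
        intro heq
        exact hno (s + 1) (by omega) (le_refl _) (by rw [List.getElem?_eq_getElem hs, heq])
      have hstep : pvFindDown xs t (s + 1) = pvFindDown xs t s := by
        conv_lhs => rw [pvFindDown]
        rw [hget, if_neg hne]
      rw [hstep]
      exact ihs p (by omega) hps hpt (fun r hr1 hr2 => hno r hr1 (by omega))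

-- A's chain of chosen indices reads off the greedy selection
theorem pv_gen_A (k : Nat) : ∀ (full : List Int) (s : Nat), k + s ≤ full.length →
    (pvIdxChain full.reverse k ((full.length : Int) - (s : Int))).map
        (fun x => PySem.List.pyGetD full.reverse x 0) = pvG k (full.drop s) := by
  induction k with
  | zero => intro full s h; simp [pvIdxChain, pvG]
  | succ k ih =>
    intro full s hks
    have hlenrev : full.reverse.length = full.length := List.length_reverse
    -- the slice in reversed coordinates is the reversed greedy window
    have hslice : PySem.List.slice full.reverse (some (k : Int))
        (some ((full.length : Int) - (s : Int)))
        = ((full.drop s).take (full.length - s - k)).reverse := by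
      rw [PySem.List.slice_of_nonneg _ (by positivity) (by omega)
        (by rw [hlenrev]; omega) (by rw [hlenrev]; omega)]
      have hbt : (((full.length : Int) - (s : Int))).toNat = full.length - s := by omega
      have hat : ((k : Int)).toNat = k := by omega
      rw [hbt, hat, List.drop_reverse, List.take_reverse]
      have hlen2 : (full.take (full.length - k)).length - (full.length - s - k) = s := by
        simp
        omega
      rw [hlen2, List.drop_take]
      rw [show full.length - k - s = full.length - s - k from by omega]
    have hwlen : ((full.drop s).take (full.length - s - k)).length
        = full.length - s - k := by
      rw [List.length_take, List.length_drop]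
      omega
    have hwne : (full.drop s).take (full.length - s - k) ≠ [] := by
      intro hnil
      rw [hnil] at hwlen
      simp at hwlen
      omega
    have hmw : pvMaxD ((full.drop s).take (full.length - s - k))
        ∈ (full.drop s).take (full.length - s - k) := pvMaxD_mem _ hwne
    have hmys : pvMaxD ((full.drop s).take (full.length - s - k)) ∈ full.drop s :=
      List.mem_of_mem_take hmw
    set m := pvMaxD ((full.drop s).take (full.length - s - k)) with hm
    set j := (full.drop s).idxOf m with hj
    have hjw : j = ((full.drop s).take (full.length - s - k)).idxOf m := by
      conv_lhs => rw [hj, ← List.take_append_drop (full.length - s - k) (full.drop s)]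
      exact List.idxOf_append_of_mem hmw
    have hjlt : j < full.length - s - k := by
      have hlt := List.idxOf_lt_length_of_mem hmw
      rw [hwlen] at hlt
      rw [hjw]
      exact hlt
    have hyj : (full.drop s)[j]'(by simp; omega) = m :=
      List.getElem_idxOf (List.idxOf_lt_length_of_mem hmys)
    have hfj : full[s + j]'(by omega) = m := by
      rw [← hyj, List.getElem_drop]
    -- where the downward scan stops: reversed index n-1-(s+j)
    have hfind : pvFindDown full.reverse m (full.length - s - 1)
        = ((full.length - 1 - (s + j) : Nat) : Int) := by
      apply pvFindDown_spec full.reverse m (full.length - s - 1) (full.length - 1 - (s + j))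
        (by rw [hlenrev]; omega) (by omega)
      · rw [List.getElem?_eq_getElem (by rw [hlenrev]; omega)]
        rw [List.getElem_reverse]
        simp only [show full.length - 1 - (full.length - 1 - (s + j)) = s + j from by omega]
        rw [hfj]
      · intro r hr1 hr2
        rw [List.getElem?_eq_getElem (by rw [hlenrev]; omega)]
        rw [List.getElem_reverse]
        intro hsome
        have hval : full[full.length - 1 - r]'(by omega) = m := Option.some.inj hsome
        have hqlt : full.length - 1 - r - s < j := by omega
        have hqe : (full.drop s)[full.length - 1 - r - s]'(by simp; omega) = m := by
          rw [List.getElem_drop]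
          simp only [show s + (full.length - 1 - r - s) = full.length - 1 - r from by omega]
          exact hval
        exact pv_before_idxOf_ne (full.drop s) m _ (hj ▸ hqlt) (by simp; omega) hqe
    -- unfold one step of the chain
    have htarget : (PySem.List.max? (PySem.List.slice full.reverse (some ((k : Nat) : Int))
        (some ((full.length : Int) - (s : Int)))) (fun y => y)).getD 0 = m := by
      have hdef : (PySem.List.max? (PySem.List.slice full.reverse (some ((k : Nat) : Int))
          (some ((full.length : Int) - (s : Int)))) (fun y => y)).getD 0
          = pvMaxD (PySem.List.slice full.reverse (some ((k : Nat) : Int))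
            (some ((full.length : Int) - (s : Int)))) := rfl
      rw [hdef, hslice, pvMaxD_reverse]
    have htn : ((((full.length : Int) - (s : Int)) - 1)).toNat = full.length - s - 1 := by
      omega
    have hchain : pvIdxChain full.reverse (k + 1) ((full.length : Int) - (s : Int))
        = ((full.length - 1 - (s + j) : Nat) : Int)
          :: pvIdxChain full.reverse k (((full.length - 1 - (s + j) : Nat) : Int)) := by
      conv_lhs => rw [pvIdxChain]
      simp only [htarget, htn, hfind]
    have hGs : pvG (k + 1) (full.drop s) = m :: pvG k (full.drop (s + (j + 1))) := by
      rw [pvG]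
      simp only [List.length_drop]
      rw [← hm, ← hj, List.drop_drop]
    rw [hchain, List.map_cons, hGs]
    congr 1
    · rw [PySem.List.pyGetD_natCast]
      rw [List.getD_eq_getElem _ _ (by rw [hlenrev]; omega)]
      rw [List.getElem_reverse]
      simp only [show full.length - 1 - (full.length - 1 - (s + j)) = s + j from by omega]
      exact hfj
    · have hcast2 : ((full.length - 1 - (s + j) : Nat) : Int)
          = (full.length : Int) - ((s + j + 1 : Nat) : Int) := by omega
      rw [hcast2]
      rw [ih full (s + j + 1) (by omega)]
      congr 1

-- unrolling A's fold over the descending index range into the chain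
theorem pvAStep_eval (lrev : List Int) (K : Int) (i : Nat) (rest : List Int) (hi : Int)
    (hcase : ((i : Int) = K - 1 ∧ rest = [] ∧ hi = (lrev.length : Int)) ∨
      ((i : Int) < K - 1 ∧ rest.head? = some hi)) :
    pvAStep lrev K (PySem.List.pyRange 0 ((i : Int) + 1) 1 ++ rest) ((i : Int))
      = PySem.List.pyRange 0 (i : Int) 1 ++
        ((pvFindDown lrev ((PySem.List.max? (PySem.List.slice lrev (some ((i : Int)))
            (some hi)) (fun y => y)).getD 0) (hi - 1).toNat) :: rest) := by
  have hplen : (PySem.List.pyRange 0 ((i : Int) + 1) 1).length = i + 1 := by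
    rw [PySem.List.length_pyRange_one]
    omega
  have hhi : (if (i : Int) = K - 1 then ((lrev.length : Nat) : Int)
      else PySem.List.pyGetD (PySem.List.pyRange 0 ((i : Int) + 1) 1 ++ rest) ((i : Int) + 1) 0)
      = hi := by
    rcases hcase with ⟨hK, hrest, hhiv⟩ | ⟨hK, hhead⟩
    · rw [if_pos hK, hhiv]
    · rw [if_neg (by omega)]
      rcases rest with _ | ⟨h0, rest'⟩
      · simp at hhead
      · rw [show (i : Int) + 1 = ((i + 1 : Nat) : Int) from by push_cast; ring]
        have hplen' : (PySem.List.pyRange 0 ((i + 1 : Nat) : Int) 1).length = i + 1 := by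
          rw [PySem.List.length_pyRange_one]
          omega
        rw [PySem.List.pyGetD_natCast, List.getD_eq_getElem?_getD]
        rw [List.getElem?_append_right (le_of_eq hplen')]
        rw [hplen']
        simp only [Nat.sub_self, List.getElem?_cons_zero, Option.getD_some]
        simpa using hhead
  have hstart : PySem.List.pyGetD (PySem.List.pyRange 0 ((i : Int) + 1) 1 ++ rest) ((i : Int)) 0
      = (i : Int) := by
    rw [PySem.List.pyGetD_natCast, List.getD_eq_getElem?_getD]
    rw [List.getElem?_append_left (by rw [hplen]; omega)]
    rw [PySem.List.getElem?_pyRange_one]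
    rw [if_pos (by omega)]
    simp
  simp only [pvAStep]
  rw [hhi, hstart]
  rw [PySem.List.pySetD_natCast]
  conv_lhs => rw [PySem.List.pyRange_one_succ_right (by omega : (0 : Int) ≤ (i : Int))]
  rw [List.append_assoc]
  rw [List.set_append_right _ _ (by rw [PySem.List.length_pyRange_one]; omega)]
  rw [show i - (PySem.List.pyRange 0 ((i : Int)) 1).length = 0 from by
    rw [PySem.List.length_pyRange_one]; omega]
  simp only [List.cons_append, List.nil_append]
  rw [List.set_cons_zero]

theorem pv_fold_A (lrev : List Int) (K : Int) : ∀ (i : Nat) (hi : Int) (rest : List Int),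
    (((i : Int) = K - 1 ∧ rest = [] ∧ hi = (lrev.length : Int)) ∨
      ((i : Int) < K - 1 ∧ rest.head? = some hi)) →
    (PySem.List.pyRange (i : Int) (-1) (-1)).foldl (pvAStep lrev K)
        (PySem.List.pyRange 0 ((i : Int) + 1) 1 ++ rest) =
      (pvIdxChain lrev (i + 1) hi).reverse ++ rest := by
  intro i
  induction i with
  | zero =>
    intro hi rest hcase
    rw [PySem.List.pyRange_neg_one_cons (by simp : (-1 : Int) < ((0 : Nat) : Int))]
    rw [show ((0 : Nat) : Int) - 1 = -1 from by simp]
    rw [PySem.List.pyRange_neg_one_eq_nil (le_refl (-1))]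
    simp only [List.foldl_cons, List.foldl_nil]
    rw [pvAStep_eval lrev K 0 rest hi hcase]
    rw [PySem.List.pyRange_one_eq_nil (show ((0 : Nat) : Int) ≤ 0 from by simp)]
    simp only [pvIdxChain]
    simp
  | succ i ihp =>
    intro hi rest hcase
    rw [PySem.List.pyRange_neg_one_cons (by omega : (-1 : Int) < ((i + 1 : Nat) : Int))]
    simp only [List.foldl_cons]
    rw [pvAStep_eval lrev K (i + 1) rest hi hcase]
    set A := pvFindDown lrev ((PySem.List.max? (PySem.List.slice lrev
      (some (((i + 1 : Nat)) : Int)) (some hi)) (fun y => y)).getD 0) (hi - 1).toNat with hA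
    have hchain : pvIdxChain lrev (i + 1 + 1) hi = A :: pvIdxChain lrev (i + 1) A := by
      simp only [pvIdxChain]
      rw [hA]
    rw [show ((i + 1 : Nat) : Int) - 1 = (i : Int) from by push_cast; ring]
    rw [show ((i + 1 : Nat) : Int) = (i : Int) + 1 from by push_cast; ring]
    rw [ihp A (A :: rest) (Or.inr ⟨by omega, rfl⟩)]
    rw [hchain]
    simp [List.append_assoc]

-- ===== VERDICT (by name: the statement is the Claim_ definition above) =====
theorem solve_line_spec : Claim_equal_solve_line := by
  intro line K _ hpre
  obtain ⟨hk1, hkn, _⟩ := hpre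
  unfold Spec_solve_line
  have hkK : ((K.toNat : Nat) : Int) = K := by omega
  have hk1' : 1 ≤ K.toNat := by omega
  have hkn' : K.toNat ≤ line.length := by omega
  have hA : solve_line line K = (PySem.Int.ofStr? (PySem.Str.join ""
      ((pvG K.toNat line).map (fun d => PySem.Int.toStr d)))).getD 0 := by
    simp only [solve_line, PySem.List.slice?_none_none_neg_one, Option.getD_some]
    rw [show ((PySem.List.pyRange 0 K 1).length : Int) = K from by
      rw [PySem.List.length_pyRange_one]; omega]
    rw [show K - 1 = ((K.toNat - 1 : Nat) : Int) from by omega]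
    rw [show PySem.List.pyRange 0 K 1
        = PySem.List.pyRange 0 (((K.toNat - 1 : Nat) : Int) + 1) 1 ++ [] from by
      rw [List.append_nil]; congr 1; omega]
    rw [pv_fold_A line.reverse K (K.toNat - 1) ((line.reverse.length : Int)) []
      (Or.inl ⟨by omega, rfl, rfl⟩)]
    simp only [List.append_nil, List.reverse_reverse]
    rw [show K.toNat - 1 + 1 = K.toNat from by omega]
    rw [show ((line.reverse.length : Nat) : Int)
        = (line.length : Int) - (((0 : Nat) : Nat) : Int) from by simp]
    rw [show (fun x => PySem.Int.toStr (PySem.List.pyGetD line.reverse x 0))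
        = PySem.Int.toStr ∘ (fun x => PySem.List.pyGetD line.reverse x 0) from rfl]
    rw [← List.map_map]
    rw [pv_gen_A K.toNat line 0 (by omega)]
    rw [List.drop_zero]
  have hB : solve_line_alt line K = (PySem.Int.ofStr? (PySem.Str.join ""
      ((pvG K.toNat line).map (fun d => PySem.Int.toStr d)))).getD 0 := by
    simp only [solve_line_alt]
    rw [show K = ((K.toNat : Nat) : Int) from by omega]
    rw [PySem.List.slice_to_natCast]
    rw [pv_main_B K.toNat line (by omega) (by omega)]
    simp only [Int.toNat_natCast]
  rw [hA, hB]
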